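-- pv_equiv track=rewrite | github.com/JacquesLucke/string_matching_tests | main.py | match_token_initials
-- ===== SOURCE A (Python) =====
-- def match_token_initials(query_token, result_tokens, start=0):
--     if start >= len(result_tokens):
--         return None
--
--     query_index = 0
--     token_index = start
--     char_index = 0
--     used_result_token_indices = set()
--     while query_index < len(query_token):
--         current_char = query_token[query_index]
--         while True:
--             if token_index >= len(result_tokens):
--                 return match_token_initials(query_token, result_tokens, start + 1)
--             result_token = result_tokens[token_index]
--             if char_index < len(result_token) and result_token[char_index] == current_char:
--                 used_result_token_indices.add(token_index)
--                 query_index += 1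
--                 char_index += 1
--                 break
--             token_index += 1
--             char_index = 0
--     return used_result_token_indices
-- ===== SOURCE B (Python) =====
-- def match_token_initials(query_token, result_tokens, start=0):
--     n = len(result_tokens)
--     for s in range(start, n):
--         used = set()
--         ti = s
--         ci = 0
--         ok = True
--         for c in query_token:
--             while ti < n:
--                 tok = result_tokens[ti]
--                 if ci < len(tok) and tok[ci] == c:
--                     used.add(ti)
--                     ci += 1
--                     break
--                 ti += 1
--                 ci = 0
--             else:
--                 ok = False
--                 break
--         if ok:
--             return used
--     return None
-- ===== Notes on version B (the rewrite author's own statement) =====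
-- stated objective: simpler
-- what changed: A's tail-recursive restart (the function re-calls itself with start+1 whenever the token scan exhausts) is replaced by a flat outer loop 'for s in range(start, n)' that runs one independent greedy attempt per candidate start and returns the first successful attempt's index set.
import Mathlib
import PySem

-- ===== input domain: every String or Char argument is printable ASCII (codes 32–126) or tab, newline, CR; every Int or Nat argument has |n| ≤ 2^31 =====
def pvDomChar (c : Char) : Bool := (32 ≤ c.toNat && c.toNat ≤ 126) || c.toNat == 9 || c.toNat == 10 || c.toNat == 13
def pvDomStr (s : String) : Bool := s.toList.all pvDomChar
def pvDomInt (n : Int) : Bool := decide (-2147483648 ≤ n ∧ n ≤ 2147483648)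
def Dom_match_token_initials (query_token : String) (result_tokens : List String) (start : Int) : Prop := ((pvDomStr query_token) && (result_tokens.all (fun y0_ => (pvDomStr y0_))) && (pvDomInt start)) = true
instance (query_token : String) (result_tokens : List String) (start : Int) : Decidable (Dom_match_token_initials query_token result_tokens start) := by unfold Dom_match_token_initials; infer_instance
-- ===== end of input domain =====

-- B replaces A's tail-recursive restart (recursion on start+1) by a flat outer loop over
-- range(start, len(result_tokens)) with an independent greedy attempt per candidate start
-- (objective: simpler decomposition, no recursion). Return value only; neither mutates arguments.

-- ===== PORT A =====
-- A's nested while loops, flattened to one recursion on (query_index, token_index):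
-- .restart = 'return match_token_initials(..., start + 1)', .raised = IndexError, .done = final return.
inductive PvARes where
  | restart : PvARes
  | raised : PvARes
  | done : List Int → PvARes
deriving DecidableEq, Repr

def pvPassA (query_token : String) (result_tokens : List String)
    (qi ti ci : Int) (used : PySem.Set Int) : PvARes :=
  if hq : qi < (PySem.Str.len query_token : Int) then
    match PySem.Str.pyGet? query_token qi with
    | none => .raised
    | some current_char =>
      if ht : ti ≥ (result_tokens.length : Int) then .restart
      else
        match PySem.List.pyGet? result_tokens ti with
        | none => .raised
        | some result_token =>
          if ci < (PySem.Str.len result_token : Int) ∧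
             PySem.Str.pyGet? result_token ci = some current_char then
            pvPassA query_token result_tokens (qi + 1) ti (ci + 1) (PySem.Set.add used ti)
          else
            pvPassA query_token result_tokens qi (ti + 1) 0 used
  else .done used
termination_by (((PySem.Str.len query_token : Int) - qi).toNat, ((result_tokens.length : Int) - ti).toNat)
decreasing_by
  · left; omega
  · right; omega

def match_token_initials (query_token : String) (result_tokens : List String) (start : Int) : Option (List Int) :=
  if h : start ≥ (result_tokens.length : Int) then none
  else
    match pvPassA query_token result_tokens 0 start 0 PySem.Set.empty with
    | .restart => match_token_initials query_token result_tokens (start + 1)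
    | .raised => none
    | .done used => some used
termination_by ((result_tokens.length : Int) - start).toNat
decreasing_by omega

-- ===== PORT B =====
-- B's inner 'while ti < n' over tokens, for one query char c.
inductive PvBStep where
  | fail : PvBStep                                 -- while exhausted (for/else)
  | raised : PvBStep                               -- IndexError
  | matched : PySem.Set Int → Int → Int → PvBStep  -- break: (used, ti, ci) after the match
deriving DecidableEq, Repr

def pvInnerB (result_tokens : List String) (c : Char) (ti ci : Int) (used : PySem.Set Int) : PvBStep :=
  if h : ti < (result_tokens.length : Int) then
    match PySem.List.pyGet? result_tokens ti with
    | none => .raised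
    | some tok =>
      if ci < (PySem.Str.len tok : Int) ∧ PySem.Str.pyGet? tok ci = some c then
        .matched (PySem.Set.add used ti) ti (ci + 1)
      else pvInnerB result_tokens c (ti + 1) 0 used
  else .fail
termination_by ((result_tokens.length : Int) - ti).toNat
decreasing_by omega

-- B's 'for c in query_token' over the remaining query characters: one attempt at a fixed s.
def pvAttemptB (result_tokens : List String) (cs : List Char) (ti ci : Int) (used : PySem.Set Int) : PvARes :=
  match cs with
  | [] => .done used
  | c :: rest =>
    match pvInnerB result_tokens c ti ci used with
    | .fail => .restart
    | .raised => .raised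
    | .matched used' ti' ci' => pvAttemptB result_tokens rest ti' ci' used'

-- B's outer 'for s in range(start, n)'.
def pvLoopB (query_token : String) (result_tokens : List String) (ss : List Int) : Option (List Int) :=
  match ss with
  | [] => none
  | s :: rest =>
    match pvAttemptB result_tokens query_token.toList s 0 PySem.Set.empty with
    | .done used => some used
    | .raised => none
    | .restart => pvLoopB query_token result_tokens rest

def match_token_initials_alt (query_token : String) (result_tokens : List String) (start : Int) : Option (List Int) :=
  pvLoopB query_token result_tokens (PySem.List.pyRange start (result_tokens.length : Int) 1)

-- ===== PRECONDITION & SPEC =====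
-- Pre_ excludes exactly the inputs where Python A raises IndexError (negative index below
-- -len(result_tokens) reached with a nonempty query); Python B raises there too.
def Pre_match_token_initials (query_token : String) (result_tokens : List String) (start : Int) : Prop :=
  query_token = "" ∨ -(result_tokens.length : Int) ≤ start
instance (query_token : String) (result_tokens : List String) (start : Int) : Decidable (Pre_match_token_initials query_token result_tokens start) := by unfold Pre_match_token_initials; infer_instance

def pvWitness_match_token_initials : String × List String × Int := ("ab", ["apple", "bee"], 0)

def Spec_match_token_initials (query_token : String) (result_tokens : List String) (start : Int) (out : Option (List Int)) : Prop := out = match_token_initials_alt query_token result_tokens start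
instance (query_token : String) (result_tokens : List String) (start : Int) (out : Option (List Int)) : Decidable (Spec_match_token_initials query_token result_tokens start out) := by unfold Spec_match_token_initials; infer_instance

-- ===== CLAIM (what is proved, stated in full; the proofs are below) =====
def Claim_equal_match_token_initials : Prop := ∀ (query_token : String) (result_tokens : List String) (start : Int), Dom_match_token_initials query_token result_tokens start → Pre_match_token_initials query_token result_tokens start → Spec_match_token_initials query_token result_tokens start (match_token_initials query_token result_tokens start)

-- ===== LEMMAS AND PROOFS =====

-- one unfolding of pvInnerB when the current token does not match at ci: advance the token.
theorem pvInnerB_step (result_tokens : List String) (c : Char) (ti ci : Int)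
    (used : PySem.Set Int) (h : ti < (result_tokens.length : Int)) (tok : String)
    (htok : PySem.List.pyGet? result_tokens ti = some tok)
    (hc : ¬ (ci < (PySem.Str.len tok : Int) ∧ PySem.Str.pyGet? tok ci = some c)) :
    pvInnerB result_tokens c ti ci used = pvInnerB result_tokens c (ti + 1) 0 used := by
  rw [pvInnerB]; simp only [dif_pos h, htok, if_neg hc]

-- one unfolding of pvInnerB when the current token matches at ci: break with ti recorded.
theorem pvInnerB_matched (result_tokens : List String) (c : Char) (ti ci : Int)
    (used : PySem.Set Int) (h : ti < (result_tokens.length : Int)) (tok : String)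
    (htok : PySem.List.pyGet? result_tokens ti = some tok)
    (hc : ci < (PySem.Str.len tok : Int) ∧ PySem.Str.pyGet? tok ci = some c) :
    pvInnerB result_tokens c ti ci used
      = .matched (PySem.Set.add used ti) ti (ci + 1) := by
  rw [pvInnerB]; simp only [dif_pos h, htok, if_pos hc]

-- A's flattened pass at (qi, ti, ci) computes B's attempt on the remaining query characters.
theorem pvPassA_eq_attemptB (query_token : String) (result_tokens : List String)
    (qi ti ci : Int) (used : PySem.Set Int) :
    0 ≤ qi →
    pvPassA query_token result_tokens qi ti ci used
      = pvAttemptB result_tokens (query_token.toList.drop qi.toNat) ti ci used := by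
  fun_induction pvPassA query_token result_tokens qi ti ci used with
  | case1 qi ti ci used hq hnone =>
    intro hqi
    exfalso
    have hlt : qi.toNat < query_token.toList.length := by
      have := PySem.Str.len_eq query_token; omega
    have : PySem.Str.pyGet? query_token qi = query_token.toList[qi.toNat]? := by
      conv_lhs => rw [show qi = ((qi.toNat : Nat) : Int) from by omega]
      rw [PySem.Str.pyGet?_natCast]
    rw [hnone] at this
    exact Option.some_ne_none _ (this.trans (List.getElem?_eq_getElem hlt)).symm
  | case2 qi ti ci used hq c hc ht =>
    intro hqi
    have hlt : qi.toNat < query_token.toList.length := by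
      have := PySem.Str.len_eq query_token; omega
    have hget : query_token.toList[qi.toNat]? = some c := by
      rw [← PySem.Str.pyGet?_natCast, show ((qi.toNat : Nat) : Int) = qi by omega, hc]
    rw [List.drop_eq_getElem_cons hlt, pvAttemptB,
        show query_token.toList[qi.toNat] = c from
          Option.some.inj ((List.getElem?_eq_getElem hlt).symm.trans hget)]
    rw [pvInnerB, dif_neg (show ¬ ti < (result_tokens.length : Int) by omega)]
  | case3 qi ti ci used hq c hc ht hnone =>
    intro hqi
    have hlt : qi.toNat < query_token.toList.length := by
      have := PySem.Str.len_eq query_token; omega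
    have hget : query_token.toList[qi.toNat]? = some c := by
      rw [← PySem.Str.pyGet?_natCast, show ((qi.toNat : Nat) : Int) = qi by omega, hc]
    rw [List.drop_eq_getElem_cons hlt, pvAttemptB,
        show query_token.toList[qi.toNat] = c from
          Option.some.inj ((List.getElem?_eq_getElem hlt).symm.trans hget)]
    rw [pvInnerB, dif_pos (show ti < (result_tokens.length : Int) by omega), hnone]
  | case4 qi ti ci used hq c hc ht tok htok hmatch ih =>
    intro hqi
    have hlt : qi.toNat < query_token.toList.length := by
      have := PySem.Str.len_eq query_token; omega
    have hget : query_token.toList[qi.toNat]? = some c := by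
      rw [← PySem.Str.pyGet?_natCast, show ((qi.toNat : Nat) : Int) = qi by omega, hc]
    rw [List.drop_eq_getElem_cons hlt, pvAttemptB,
        show query_token.toList[qi.toNat] = c from
          Option.some.inj ((List.getElem?_eq_getElem hlt).symm.trans hget)]
    rw [pvInnerB_matched result_tokens c ti ci used (by omega) tok htok hmatch]
    rw [ih (by omega), show (qi + 1).toNat = qi.toNat + 1 by omega]
  | case5 qi ti ci used hq c hc ht tok htok hmatch ih =>
    intro hqi
    have hlt : qi.toNat < query_token.toList.length := by
      have := PySem.Str.len_eq query_token; omega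
    have hget : query_token.toList[qi.toNat]? = some c := by
      rw [← PySem.Str.pyGet?_natCast, show ((qi.toNat : Nat) : Int) = qi by omega, hc]
    rw [ih hqi, List.drop_eq_getElem_cons hlt]
    rw [show query_token.toList[qi.toNat] = c from
          Option.some.inj ((List.getElem?_eq_getElem hlt).symm.trans hget)]
    simp only [pvAttemptB]
    rw [pvInnerB_step result_tokens c ti ci used (by omega) tok htok hmatch]
  | case6 qi ti ci used hq =>
    intro hqi
    have : query_token.toList.length ≤ qi.toNat := by
      have := PySem.Str.len_eq query_token; omega
    rw [List.drop_eq_nil_of_le this, pvAttemptB]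

-- A's restart recursion traverses exactly range(start, n).
theorem pvA_eq_loopB (query_token : String) (result_tokens : List String) (start : Int) :
    match_token_initials query_token result_tokens start
      = pvLoopB query_token result_tokens
          (PySem.List.pyRange start (result_tokens.length : Int) 1) := by
  fun_induction match_token_initials query_token result_tokens start with
  | case1 start h =>
    rw [PySem.List.pyRange_one_eq_nil (by omega), pvLoopB]
  | case2 start h heq ih =>
    have hb : pvAttemptB result_tokens query_token.toList start 0 PySem.Set.empty
        = .restart := by
      have hp := (pvPassA_eq_attemptB query_token result_tokens 0 start 0
        PySem.Set.empty le_rfl).symm.trans heq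
      rwa [Int.toNat_zero, List.drop_zero] at hp
    rw [PySem.List.pyRange_one_cons (by omega), pvLoopB, hb]
    exact ih
  | case3 start h heq =>
    have hb : pvAttemptB result_tokens query_token.toList start 0 PySem.Set.empty
        = .raised := by
      have hp := (pvPassA_eq_attemptB query_token result_tokens 0 start 0
        PySem.Set.empty le_rfl).symm.trans heq
      rwa [Int.toNat_zero, List.drop_zero] at hp
    rw [PySem.List.pyRange_one_cons (by omega), pvLoopB, hb]
  | case4 start h used heq =>
    have hb : pvAttemptB result_tokens query_token.toList start 0 PySem.Set.empty
        = .done used := by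
      have hp := (pvPassA_eq_attemptB query_token result_tokens 0 start 0
        PySem.Set.empty le_rfl).symm.trans heq
      rwa [Int.toNat_zero, List.drop_zero] at hp
    rw [PySem.List.pyRange_one_cons (by omega), pvLoopB, hb]

-- ===== VERDICT (by name: the statement is the Claim_ definition above) =====
theorem match_token_initials_spec : Claim_equal_match_token_initials := by
  intro q rt start _ _
  unfold Spec_match_token_initials match_token_initials_alt
  exact pvA_eq_loopB q rt start
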